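-- pv_equiv track=rewrite | github.com/jacbz/lisztnup | data/link_deezer.py | parse_pg_dump_values
-- ===== SOURCE A (Python) =====
-- def parse_pg_dump_values(data_string):
--     fields = []
--     in_quotes = False
--     current_field = []
--     i = 0
--     while i < len(data_string):
--         char = data_string[i]
--         if char == "'":
--             if i + 1 < len(data_string) and data_string[i+1] == "'":
--                 current_field.append("''")
--                 i += 1
--             else:
--                 in_quotes = not in_quotes
--                 current_field.append("'")
--         elif char == ',' and not in_quotes:
--             fields.append("".join(current_field).strip())
--             current_field = []
--         else:
--             current_field.append(char)
--         i += 1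
--     fields.append("".join(current_field).strip())
--     return fields
-- ===== SOURCE B (Python) =====
-- def _quote_run_parity(part):
--     # parity of quotes left untoggled-out by the greedy "''" pairing:
--     # XOR over maximal runs of "'" of (run length is odd)
--     parity = False
--     run = 0
--     for ch in part:
--         if ch == "'":
--             run += 1
--         else:
--             parity ^= bool(run & 1)
--             run = 0
--     return parity ^ bool(run & 1)
--
--
-- def parse_pg_dump_values(data_string):
--     fields = []
--     pieces = []
--     in_quotes = False
--     for part in data_string.split(','):
--         if _quote_run_parity(part):
--             in_quotes = not in_quotes
--         pieces.append(part)
--         if not in_quotes: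
--             fields.append(','.join(pieces).strip())
--             pieces = []
--     if pieces:
--         fields.append(','.join(pieces).strip())
--     return fields
-- ===== Notes on version B (the rewrite author's own statement) =====
-- stated objective: faster
-- what changed: B splits the string on every comma first (one bulk str.split) and then regroups the parts into fields by tracking quote state via the run-length parity of quote runs per part, instead of A's single index-based per-character loop with one-character lookahead.
import Mathlib
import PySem

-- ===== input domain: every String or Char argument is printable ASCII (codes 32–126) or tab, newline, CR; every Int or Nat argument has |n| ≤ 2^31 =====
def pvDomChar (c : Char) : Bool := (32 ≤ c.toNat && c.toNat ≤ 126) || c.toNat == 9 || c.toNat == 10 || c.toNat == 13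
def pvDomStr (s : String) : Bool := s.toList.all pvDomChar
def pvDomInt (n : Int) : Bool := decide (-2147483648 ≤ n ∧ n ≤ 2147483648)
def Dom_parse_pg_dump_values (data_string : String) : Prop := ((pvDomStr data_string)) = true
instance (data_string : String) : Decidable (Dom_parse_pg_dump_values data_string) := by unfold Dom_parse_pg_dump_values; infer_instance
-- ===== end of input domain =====

-- B re-decomposes the parse: one bulk split on ',' first, then regroup parts into fields using
-- the run-length parity of quote runs per part (a measured constant-factor speedup over A's
-- indexed per-character loop with lookahead); A is total, so no Pre_ is needed.

-- "".join(field).strip()  /  ",".join(pieces).strip()  (shared packing helper)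
def pyStripMk (l : List Char) : String := PySem.Str.strip (String.mk l)

-- ===== PORT A =====
-- the while loop of A: state = (remaining chars, in_quotes, current_field, fields)
def goA : List Char → Bool → List Char → List String → List String
  | [], _inq, cur, fs => fs ++ [pyStripMk cur]
  | c :: rest, inq, cur, fs =>
    if c = '\'' then
      match rest with
      | c2 :: rest2 =>
        if c2 = '\'' then goA rest2 inq (cur ++ ['\'', '\'']) fs
        else goA (c2 :: rest2) (!inq) (cur ++ ['\'']) fs
      | [] => goA [] (!inq) (cur ++ ['\'']) fs
    else if c = ',' && !inq then goA rest inq [] (fs ++ [pyStripMk cur])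
    else goA rest inq (cur ++ [c]) fs

def parse_pg_dump_values (data_string : String) : List String :=
  goA data_string.toList false [] []

-- ===== PORT B =====
-- _quote_run_parity: fold with state (parity, current run length)
def quoteRunParity (part : List Char) : Bool :=
  let st := part.foldl
    (fun (st : Bool × Nat) ch =>
      if ch = '\'' then (st.1, st.2 + 1) else (xor st.1 (decide (st.2 % 2 = 1)), 0))
    (false, 0)
  xor st.1 (decide (st.2 % 2 = 1))

-- the for loop over parts: state = (remaining parts, in_quotes, pieces, fields)
def goB : List (List Char) → Bool → List (List Char) → List String → List String
  | [], _inq, pieces, fs =>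
    if pieces.isEmpty then fs
    else fs ++ [pyStripMk (PySem.Chars.join [','] pieces)]
  | p :: rest, inq, pieces, fs =>
    let inq' := if quoteRunParity p then !inq else inq
    let pieces' := pieces ++ [p]
    if inq' then goB rest inq' pieces' fs
    else goB rest inq' [] (fs ++ [pyStripMk (PySem.Chars.join [','] pieces')])

def parse_pg_dump_values_alt (data_string : String) : List String :=
  goB (PySem.Chars.splitOn data_string.toList [',']) false [] []

-- ===== PRECONDITION & SPEC =====
def Spec_parse_pg_dump_values (data_string : String) (out : List String) : Prop := out = parse_pg_dump_values_alt data_string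
instance (data_string : String) (out : List String) : Decidable (Spec_parse_pg_dump_values data_string out) := by unfold Spec_parse_pg_dump_values; infer_instance

-- ===== CLAIM (what is proved, stated in full; the proofs are below) =====
def Claim_equal_parse_pg_dump_values : Prop := ∀ (data_string : String), Dom_parse_pg_dump_values data_string → Spec_parse_pg_dump_values data_string (parse_pg_dump_values data_string)

-- ===== LEMMAS AND PROOFS =====

-- greedy unpaired-quote parity, as A's loop computes it inside one comma-free part
def gA : List Char → Bool
  | [] => false
  | c :: t =>
    if c = '\'' then
      match t with
      | c2 :: t2 => if c2 = '\'' then gA t2 else !gA (c2 :: t2)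
      | [] => !gA ([] : List Char)
    else gA t

-- accumulator-free model of PySem.Chars.splitOn.go for sep = [',']
def mySplit : List Char → List Char → List (List Char) → List (List Char)
  | [], cur, acc => (cur.reverse :: acc).reverse
  | c :: rest, cur, acc =>
    if c = ',' then mySplit rest [] (cur.reverse :: acc)
    else mySplit rest (c :: cur) acc

theorem go_eq_mySplit (l : List Char) : ∀ (fuel : Nat) (cur : List Char) (acc : List (List Char)),
    l.length ≤ fuel → PySem.Chars.splitOn.go [','] fuel l cur acc = mySplit l cur acc := by
  induction l with
  | nil =>
    intro fuel cur acc _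
    cases fuel <;> simp [PySem.Chars.splitOn.go, mySplit]
  | cons c rest ih =>
    intro fuel cur acc h
    cases fuel with
    | zero => simp at h
    | succ f =>
      simp only [PySem.Chars.splitOn.go, mySplit]
      by_cases hc : c = ','
      · subst hc
        simp only [List.isPrefixOf, if_pos rfl]
        simp only [List.length_cons, Nat.succ_le_succ_iff] at h
        simpa using ih f [] (cur.reverse :: acc) h
      · have : List.isPrefixOf [','] (c :: rest) = false := by
          simp [List.isPrefixOf]; exact fun h' => (hc h'.symm).elim
        simp only [List.length_cons, Nat.succ_le_succ_iff] at h
        simp only [this, Bool.false_eq_true, if_neg, if_false]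
        rw [if_neg (by simpa using hc)]
        exact ih f (c :: cur) acc h

theorem splitOn_eq_mySplit (l : List Char) : PySem.Chars.splitOn l [','] = mySplit l [] [] :=
  go_eq_mySplit l (l.length + 1) [] [] (Nat.le_succ _)

theorem mySplit_acc (l : List Char) : ∀ (cur : List Char) (acc : List (List Char)),
    mySplit l cur acc = acc.reverse ++ mySplit l cur [] := by
  induction l with
  | nil => intro cur acc; simp [mySplit]
  | cons c rest ih =>
    intro cur acc
    by_cases hc : c = ','
    · subst hc
      simp only [mySplit, if_pos rfl]
      rw [ih [] (cur.reverse :: acc), ih [] [cur.reverse]]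
      simp
    · simp only [mySplit, if_neg hc]
      exact ih _ _

theorem mySplit_no_comma (p : List Char) (h : ',' ∉ p) :
    ∀ (cur : List Char), mySplit p cur [] = [cur.reverse ++ p] := by
  induction p with
  | nil => intro cur; simp [mySplit]
  | cons c t ih =>
    intro cur
    have hc : c ≠ ',' := fun e => h (e ▸ List.mem_cons_self ..)
    simp only [mySplit, if_neg hc]
    rw [ih (fun hm => h (List.mem_cons_of_mem _ hm)) (c :: cur)]
    simp

theorem mySplit_comma (p : List Char) (h : ',' ∉ p) : ∀ (rest cur : List Char),
    mySplit (p ++ ',' :: rest) cur [] = (cur.reverse ++ p) :: mySplit rest [] [] := by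
  induction p with
  | nil =>
    intro rest cur
    simp only [List.nil_append, mySplit, if_pos rfl]
    rw [mySplit_acc]
    simp
  | cons c t ih =>
    intro rest cur
    have hc : c ≠ ',' := fun e => h (e ▸ List.mem_cons_self ..)
    simp only [List.cons_append, mySplit, if_neg hc]
    rw [ih (fun hm => h (List.mem_cons_of_mem _ hm)) rest (c :: cur)]
    simp

-- A's loop over a comma-free part just appends it and xors in gA of the part
theorem goA_part : ∀ (p : List Char), ',' ∉ p →
    ∀ (rest : List Char) (inq : Bool) (cur : List Char) (fs : List String),
    (rest = [] ∨ ∃ t, rest = ',' :: t) →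
    goA (p ++ rest) inq cur fs = goA rest (xor inq (gA p)) (cur ++ p) fs := by
  intro p
  induction p using gA.induct with
  | case1 => intro _ rest inq cur fs _; simp [gA]
  | case2 a1 a2 =>
    intro hmem rest inq cur fs hrest
    have hm : ',' ∉ a1 := fun h => hmem (by simp [h])
    simp only [List.cons_append, goA, if_pos rfl]
    rw [a2 hm rest inq (cur ++ ['\'', '\'']) fs hrest]
    simp [gA]
  | case3 a1 a2 a3 a4 =>
    intro hmem rest inq cur fs hrest
    have hm : ',' ∉ a1 :: a2 := fun h => hmem (by simp at h ⊢; tauto)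
    simp only [List.cons_append, goA, if_pos rfl, if_neg a3, if_true]
    have h4 := a4 hm rest (!inq) (cur ++ ['\'']) fs hrest
    rw [List.cons_append] at h4
    rw [h4]
    have : ((!inq) ^^ gA (a1 :: a2)) = (inq ^^ gA ('\'' :: a1 :: a2)) := by
      simp only [gA, if_pos rfl, if_neg a3]
      cases inq <;> simp
    rw [this]
    simp
  | case4 a1 =>
    intro hmem rest inq cur fs hrest
    have : goA (['\''] ++ rest) inq cur fs = goA rest (!inq) (cur ++ ['\'']) fs := by
      rcases hrest with h | ⟨t, h⟩ <;> subst h <;> simp [goA]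
    rw [this]
    have : (inq ^^ gA ['\'']) = (!inq) := by simp [gA]
    rw [this]
  | case5 a1 a2 hne ih =>
    intro hmem rest inq cur fs hrest
    have hm : ',' ∉ a2 := fun h => hmem (by simp [h])
    have hc : ¬ a1 = ',' := fun h => hmem (by simp [h])
    rw [goA.eq_def]
    split
    next heq => exact absurd heq (by simp)
    next c r heq =>
      obtain ⟨h1, h2⟩ := List.cons.injEq .. ▸ heq
      subst h1
      subst h2
      rw [if_neg hne, if_neg (by simp [hc])]
      rw [show a2.append rest = a2 ++ rest from rfl, ih hm rest _ _ _ hrest]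
      have hg : gA (a1 :: a2) = gA a2 := by rw [gA.eq_def]; simp [hne]
      rw [hg]; simp

theorem gA_replicate (k : Nat) : gA (List.replicate k '\'') = decide (k % 2 = 1) := by
  induction k using Nat.twoStepInduction with
  | zero => simp [gA]
  | one => simp [gA]
  | more n ih _ =>
    rw [show List.replicate (n + 2) '\'' = '\'' :: '\'' :: List.replicate n '\'' from rfl]
    rw [show gA ('\'' :: '\'' :: List.replicate n '\'') = gA (List.replicate n '\'') from by
      simp [gA]]
    rw [ih]
    congr 1
    simp [Nat.add_mod]

theorem gA_run (k : Nat) : ∀ (c : Char) (t : List Char), c ≠ '\'' →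
    gA (List.replicate k '\'' ++ c :: t) = xor (decide (k % 2 = 1)) (gA (c :: t)) := by
  induction k using Nat.twoStepInduction with
  | zero => intro c t hc; simp
  | one =>
    intro c t hc
    rw [show List.replicate 1 '\'' ++ c :: t = '\'' :: c :: t from rfl]
    rw [show gA ('\'' :: c :: t) = !gA (c :: t) from by simp [gA, hc]]
    cases gA (c :: t) <;> simp
  | more n ih _ =>
    intro c t hc
    rw [show List.replicate (n + 2) '\'' ++ c :: t = '\'' :: '\'' :: (List.replicate n '\'' ++ c :: t) from by
      simp [List.replicate_succ]]
    rw [show gA ('\'' :: '\'' :: (List.replicate n '\'' ++ c :: t)) =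
        gA (List.replicate n '\'' ++ c :: t) from by simp [gA]]
    rw [ih c t hc]
    congr 1
    simp [Nat.add_mod]

theorem qrp_fold (p : List Char) : ∀ (b : Bool) (r : Nat),
    (xor (p.foldl (fun (st : Bool × Nat) ch =>
        if ch = '\'' then (st.1, st.2 + 1) else (xor st.1 (decide (st.2 % 2 = 1)), 0)) (b, r)).1
      (decide ((p.foldl (fun (st : Bool × Nat) ch =>
        if ch = '\'' then (st.1, st.2 + 1) else (xor st.1 (decide (st.2 % 2 = 1)), 0)) (b, r)).2 % 2 = 1)))
    = xor b (gA (List.replicate r '\'' ++ p)) := by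
  induction p with
  | nil => intro b r; simp [gA_replicate]
  | cons c t ih =>
    intro b r
    by_cases hc : c = '\''
    · subst hc
      simp only [List.foldl_cons, if_pos rfl, if_true]
      rw [ih b (r + 1)]
      congr 2
      rw [List.replicate_succ']
      simp
    · simp only [List.foldl_cons, if_neg hc]
      rw [ih _ 0]
      rw [List.replicate_zero, List.nil_append, gA_run r c t hc]
      rw [show gA (c :: t) = gA t from by rw [gA.eq_def]; simp [hc]]
      cases b <;> cases gA t <;> simp

theorem quoteRunParity_eq_gA (p : List Char) : quoteRunParity p = gA p := by
  have h := qrp_fold p false 0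
  rw [List.replicate_zero, List.nil_append] at h
  simpa [quoteRunParity] using h

def curOf (pieces : List (List Char)) : List Char :=
  if pieces = [] then [] else PySem.Chars.join [','] pieces ++ [',']

theorem join_snoc (pieces : List (List Char)) : ∀ (p : List Char),
    PySem.Chars.join [','] (pieces ++ [p]) = curOf pieces ++ p := by
  induction pieces with
  | nil => intro p; simp [curOf, PySem.Chars.join_singleton]
  | cons x xs ih =>
    intro p
    cases xs with
    | nil =>
      simp [PySem.Chars.join_cons_cons, PySem.Chars.join_singleton, curOf]
    | cons y ys =>
      rw [show (x :: y :: ys) ++ [p] = x :: ((y :: ys) ++ [p]) from rfl]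
      rw [show (y :: ys) ++ [p] = y :: (ys ++ [p]) from rfl]
      rw [PySem.Chars.join_cons_cons]
      rw [show y :: (ys ++ [p]) = (y :: ys) ++ [p] from rfl]
      rw [ih p]
      simp [curOf, PySem.Chars.join_cons_cons]

theorem dropWhile_head_comma : ∀ (cs : List Char) (c : Char) (t : List Char),
    cs.dropWhile (fun c => c != ',') = c :: t → c = ',' := by
  intro cs
  induction cs with
  | nil => intro c t h; simp [List.dropWhile] at h
  | cons x xs ih =>
    intro c t h
    rw [List.dropWhile_cons] at h
    by_cases hx : x = ','
    · rw [if_neg (by simp [hx])] at h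
      exact ((List.cons.injEq .. ▸ h).1).symm.trans hx
    · rw [if_pos (by simp [hx])] at h
      exact ih c t h

theorem goA_comma_step (rest' : List Char) (b : Bool) (cur : List Char) (fs : List String) :
    goA (',' :: rest') b cur fs =
      if b then goA rest' b (cur ++ [',']) fs
      else goA rest' b [] (fs ++ [pyStripMk cur]) := by
  cases b <;> rw [goA.eq_def] <;> simp

theorem goB_cons_step (p : List Char) (ps : List (List Char)) (inq : Bool)
    (pieces : List (List Char)) (fs : List String) :
    goB (p :: ps) inq pieces fs =
      if (inq ^^ gA p) then goB ps (inq ^^ gA p) (pieces ++ [p]) fs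
      else goB ps (inq ^^ gA p) [] (fs ++ [pyStripMk (PySem.Chars.join [','] (pieces ++ [p]))]) := by
  have hinq : (if quoteRunParity p then !inq else inq) = (inq ^^ gA p) := by
    rw [quoteRunParity_eq_gA]; cases gA p <;> simp
  simp only [goB, hinq]

theorem main_invariant (n : Nat) : ∀ (cs : List Char), cs.length = n →
    ∀ (inq : Bool) (pieces : List (List Char)) (fs : List String),
    goA cs inq (curOf pieces) fs = goB (mySplit cs [] []) inq pieces fs := by
  induction n using Nat.strong_induction_on with
  | _ n ih =>
  intro cs hlen inq pieces fs
  have hsplit := cs.takeWhile_append_dropWhile (p := fun c => c != ',')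
  have hpnotin : ',' ∉ cs.takeWhile (fun c => c != ',') := by
    intro hm
    have := List.mem_takeWhile_imp hm
    simp at this
  cases hd : cs.dropWhile (fun c => c != ',') with
  | nil =>
    have hcs : cs = cs.takeWhile (fun c => c != ',') := by
      conv_lhs => rw [← hsplit]
      rw [hd, List.append_nil]
    conv_lhs => rw [hcs]
    rw [show goA (cs.takeWhile (fun c => c != ',')) inq (curOf pieces) fs
        = goA ((cs.takeWhile (fun c => c != ',')) ++ []) inq (curOf pieces) fs from by
      rw [List.append_nil]]
    rw [goA_part _ hpnotin [] inq (curOf pieces) fs (Or.inl rfl)]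
    conv_rhs => rw [hcs]
    rw [mySplit_no_comma _ hpnotin []]
    rw [List.reverse_nil, List.nil_append]
    rw [goB_cons_step]
    rw [show goA [] (inq ^^ gA (cs.takeWhile (fun c => c != ','))) (curOf pieces ++ cs.takeWhile (fun c => c != ',')) fs
        = fs ++ [pyStripMk (curOf pieces ++ cs.takeWhile (fun c => c != ','))] from rfl]
    rw [← join_snoc pieces]
    cases (inq ^^ gA (cs.takeWhile (fun c => c != ','))) <;> simp [goB]
  | cons ch rest' =>
    have hch : ch = ',' := dropWhile_head_comma cs ch rest' hd
    subst hch
    have hcs : cs = (cs.takeWhile (fun c => c != ',')) ++ ',' :: rest' := by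
      conv_lhs => rw [← hsplit]
      rw [hd]
    have hlt : rest'.length < n := by
      subst hlen
      rw [hcs]
      simp
      omega
    conv_lhs => rw [hcs]
    rw [goA_part _ hpnotin (',' :: rest') inq (curOf pieces) fs (Or.inr ⟨rest', rfl⟩)]
    rw [goA_comma_step]
    conv_rhs => rw [hcs]
    rw [mySplit_comma _ hpnotin rest' []]
    rw [List.reverse_nil, List.nil_append]
    rw [goB_cons_step]
    cases hq : (inq ^^ gA (cs.takeWhile (fun c => c != ','))) with
    | false =>
      rw [if_neg (by simp), if_neg (by simp)]
      rw [← join_snoc pieces]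
      have := ih rest'.length hlt rest' rfl false []
        (fs ++ [pyStripMk (PySem.Chars.join [','] (pieces ++ [cs.takeWhile (fun c => c != ',')]))])
      rw [show curOf [] = [] from rfl] at this
      exact this
    | true =>
      rw [if_pos rfl, if_pos rfl]
      have hc2 : curOf pieces ++ cs.takeWhile (fun c => c != ',') ++ [','] =
          curOf (pieces ++ [cs.takeWhile (fun c => c != ',')]) := by
        rw [show curOf (pieces ++ [cs.takeWhile (fun c => c != ',')]) =
            PySem.Chars.join [','] (pieces ++ [cs.takeWhile (fun c => c != ',')]) ++ [','] from by
          simp [curOf]]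
        rw [join_snoc pieces]
      rw [hc2]
      exact ih rest'.length hlt rest' rfl true (pieces ++ [cs.takeWhile (fun c => c != ',')]) fs

-- ===== VERDICT (by name: the statement is the Claim_ definition above) =====
theorem parse_pg_dump_values_spec : Claim_equal_parse_pg_dump_values := by
  intro s _
  unfold Spec_parse_pg_dump_values parse_pg_dump_values parse_pg_dump_values_alt
  rw [splitOn_eq_mySplit]
  exact main_invariant s.toList.length s.toList rfl false [] []
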